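-- pv_equiv track=rewrite | github.com/B33Boy/Advent-of-Code-2024 | day9/day9.py | defragmant
-- ===== SOURCE A (Python) =====
-- def defragmant(frag: list[int], free_blocks: int) -> list[int]:
--     length = len(frag)
--     l: int = 0
--     r: int = length - 1
--
--     while free_blocks > 0:
--
--         while l < length and frag[l] is not None:
--             l += 1
--
--         while r >= 0 and frag[r] is None:
--             r -= 1
--
--         if l >= r:
--             break
--
--         frag[l], frag[r] = frag[r], frag[l]
--         free_blocks -= 1
--
--     return frag
-- ===== SOURCE B (Python) =====
-- def defragmant(frag, free_blocks):
--     # Precompute index tables from the original array instead of rescanning with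
--     # two pointers: k-th free slot (ascending) pairs with k-th filled slot
--     # (descending). Mutates frag in place (same swaps as the original) and
--     # returns the same list object.
--     free_idx = [i for i, x in enumerate(frag) if x is None]
--     filled_idx = [i for i, x in enumerate(frag) if x is not None]
--     filled_idx.reverse()
--     for l, r in zip(free_idx, filled_idx):
--         if free_blocks <= 0 or l >= r:
--             break
--         frag[l], frag[r] = frag[r], frag[l]
--         free_blocks -= 1
--     return frag
-- ===== Notes on version B (the rewrite author's own statement) =====
-- stated objective: alternative
-- what changed: Replaces A's outer while-loop with two in-place rescanning pointers by index tables built once from the original array (ascending free slots zipped with descending filled slots) and a single bounded swap loop over the zipped pairs.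
import Mathlib
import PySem

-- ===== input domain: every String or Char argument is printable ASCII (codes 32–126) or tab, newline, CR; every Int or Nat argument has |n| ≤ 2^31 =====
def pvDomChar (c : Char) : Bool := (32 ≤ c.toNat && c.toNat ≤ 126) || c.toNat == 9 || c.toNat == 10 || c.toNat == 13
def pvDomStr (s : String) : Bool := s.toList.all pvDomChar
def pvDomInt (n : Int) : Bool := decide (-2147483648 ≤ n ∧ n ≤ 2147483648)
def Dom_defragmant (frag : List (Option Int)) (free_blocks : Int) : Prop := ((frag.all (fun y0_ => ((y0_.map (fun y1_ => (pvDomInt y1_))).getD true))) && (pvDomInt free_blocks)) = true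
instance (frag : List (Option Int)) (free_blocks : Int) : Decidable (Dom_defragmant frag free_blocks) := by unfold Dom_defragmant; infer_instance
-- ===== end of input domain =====

-- B replaces A's two rescanning pointers by index tables built once from the original
-- array (k-th free slot ascending paired with k-th filled slot descending); both mutate
-- frag in place with the same swaps — the theorems are about the returned value.

-- ===== PORT A =====

-- frag[l], frag[r] = frag[r], frag[l]; both ports only use it with 0 ≤ i, j < len, where
-- pyGetD/pySetD are exact for Python's indexing/assignment.
def pySwap (xs : List (Option Int)) (i j : Int) : List (Option Int) :=
  PySem.List.pySetD (PySem.List.pySetD xs i (PySem.List.pyGetD xs j none)) j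
    (PySem.List.pyGetD xs i none)

-- while l < length and frag[l] is not None: l += 1
def scanL (frag : List (Option Int)) (length l : Int) : Int :=
  if _h : l < length then
    match PySem.List.pyGet? frag l with
    | some (some _) => scanL frag length (l + 1)
    | _ => l
  else l
termination_by (length - l).toNat
decreasing_by omega

-- while r >= 0 and frag[r] is None: r -= 1
def scanR (frag : List (Option Int)) (r : Int) : Int :=
  if _h : 0 ≤ r then
    match PySem.List.pyGet? frag r with
    | some none => scanR frag (r - 1)
    | _ => r
  else r
termination_by (r + 1).toNat
decreasing_by omega

-- while free_blocks > 0: … (the outer loop; l, r persist across iterations)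
def loopA (frag : List (Option Int)) (length fb l r : Int) : List (Option Int) :=
  if _h : fb > 0 then
    let l' := scanL frag length l
    let r' := scanR frag r
    if l' ≥ r' then frag
    else loopA (pySwap frag l' r') length (fb - 1) l' r'
  else frag
termination_by fb.toNat
decreasing_by omega

def defragmant (frag : List (Option Int)) (free_blocks : Int) : List (Option Int) :=
  loopA frag (frag.length : Int) free_blocks 0 ((frag.length : Int) - 1)

-- ===== PORT B =====

-- [i for i, x in enumerate(frag) if x is None]
def noneIdx (frag : List (Option Int)) : List Int :=
  (PySem.List.enumerate frag).filterMap
    (fun p => match p.2 with | none => some p.1 | some _ => none)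

-- [i for i, x in enumerate(frag) if x is not None]
def someIdx (frag : List (Option Int)) : List Int :=
  (PySem.List.enumerate frag).filterMap
    (fun p => match p.2 with | some _ => some p.1 | none => none)

-- for l, r in zip(free_idx, filled_idx): …
def loopB (frag : List (Option Int)) (free filled : List Int) (fb : Int) : List (Option Int) :=
  match free, filled with
  | l :: fs, r :: rs =>
      if fb ≤ 0 ∨ l ≥ r then frag
      else loopB (pySwap frag l r) fs rs (fb - 1)
  | _, _ => frag

def defragmant_alt (frag : List (Option Int)) (free_blocks : Int) : List (Option Int) :=
  loopB frag (noneIdx frag) ((someIdx frag).reverse) free_blocks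

-- ===== PRECONDITION & SPEC =====
def Spec_defragmant (frag : List (Option Int)) (free_blocks : Int) (out : List (Option Int)) : Prop := out = defragmant_alt frag free_blocks
instance (frag : List (Option Int)) (free_blocks : Int) (out : List (Option Int)) : Decidable (Spec_defragmant frag free_blocks out) := by unfold Spec_defragmant; infer_instance

-- ===== CLAIM (what is proved, stated in full; the proofs are below) =====
def Claim_equal_defragmant : Prop := ∀ (frag : List (Option Int)) (free_blocks : Int), Dom_defragmant frag free_blocks → Spec_defragmant frag free_blocks (defragmant frag free_blocks)

-- ===== LEMMAS AND PROOFS =====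

-- frag[i] is None (in range); frag[i] is not None (in range)
def NoneAt (frag : List (Option Int)) (i : Int) : Prop := PySem.List.pyGet? frag i = some none
def SomeAt (frag : List (Option Int)) (i : Int) : Prop := ∃ v, PySem.List.pyGet? frag i = some (some v)

-- The simulation invariant between A's pointer state (frag, l, r) and B's remaining
-- index lists (free, filled).  X collects the already-swapped right positions, Y the
-- already-swapped left positions.
def SimInv (frag : List (Option Int)) (l r : Int) (free filled : List Int) (X Y : Int → Prop) : Prop :=
  0 ≤ l ∧ l ≤ (frag.length : Int) ∧ r ≤ (frag.length : Int) - 1 ∧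
  List.Pairwise (· < ·) free ∧ List.Pairwise (· > ·) filled ∧
  (∀ i, (l ≤ i ∧ i < (frag.length : Int) ∧ NoneAt frag i) ↔ (i ∈ free ∨ X i)) ∧
  (∀ i, (0 ≤ i ∧ i ≤ r ∧ SomeAt frag i) ↔ (i ∈ filled ∨ Y i)) ∧
  (∀ x, X x → ∀ j ∈ filled, j < x) ∧
  (∀ y, Y y → ∀ j ∈ free, y < j) ∧
  (∀ y x, Y y → X x → y < x)

lemma pyGet?_inrange (xs : List (Option Int)) (i : Int) (h0 : 0 ≤ i) (h1 : i < (xs.length : Int)) :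
    PySem.List.pyGet? xs i = some (xs[i.toNat]'(by omega)) := by
  rw [PySem.List.pyGet?_of_nonneg xs h0, List.getElem?_eq_getElem (by omega)]

lemma not_noneAt_someAt (frag : List (Option Int)) (i : Int) (h : NoneAt frag i) (h' : SomeAt frag i) : False := by
  obtain ⟨v, hv⟩ := h'; rw [NoneAt] at h; rw [h] at hv; simp at hv

lemma length_pySwap (xs : List (Option Int)) (i j : Int) : (pySwap xs i j).length = xs.length := by
  simp [pySwap, PySem.List.length_pySetD]

lemma pyGet?_pySwap (xs : List (Option Int)) (i j k : Int)
    (hi0 : 0 ≤ i) (hi1 : i < (xs.length : Int)) (hj0 : 0 ≤ j) (hj1 : j < (xs.length : Int))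
    (hk0 : 0 ≤ k) :
    PySem.List.pyGet? (pySwap xs i j) k =
      if k = j then PySem.List.pyGet? xs i
      else if k = i then PySem.List.pyGet? xs j
      else PySem.List.pyGet? xs k := by
  have hgD : ∀ (m : Int) (hm0 : 0 ≤ m) (hm1 : m < (xs.length : Int)),
      PySem.List.pyGetD xs m none = xs[m.toNat]'(by omega) := fun m h0 h1 =>
    PySem.List.pyGetD_eq_getElem xs none h0 h1
  rw [pySwap, PySem.List.pySetD_of_nonneg _ _ hi0, PySem.List.pySetD_of_nonneg _ _ hj0,
    PySem.List.pyGet?_of_nonneg _ hk0, PySem.List.pyGet?_of_nonneg _ hi0,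
    PySem.List.pyGet?_of_nonneg _ hj0, List.getElem?_set, List.getElem?_set,
    hgD i hi0 hi1, hgD j hj0 hj1, List.length_set]
  by_cases hkj : k = j
  · rw [if_pos (by omega : j.toNat = k.toNat), if_pos (by omega : j.toNat < xs.length),
      if_pos hkj, List.getElem?_eq_getElem (by omega)]
  · rw [if_neg (by omega : ¬ j.toNat = k.toNat), if_neg hkj]
    by_cases hki : k = i
    · rw [if_pos (by omega : i.toNat = k.toNat), if_pos (by omega : i.toNat < xs.length),
        if_pos hki, List.getElem?_eq_getElem (by omega)]
    · rw [if_neg (by omega : ¬ i.toNat = k.toNat), if_neg hki]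
      exact (PySem.List.pyGet?_of_nonneg xs hk0).symm

lemma scanL_spec : ∀ (k : Nat) (frag : List (Option Int)) (n l : Int), (n - l).toNat = k →
    n = (frag.length : Int) → 0 ≤ l → l ≤ n →
    l ≤ scanL frag n l ∧ scanL frag n l ≤ n ∧
    (∀ i, l ≤ i → i < scanL frag n l → ¬ NoneAt frag i) ∧
    (scanL frag n l < n → NoneAt frag (scanL frag n l)) := by
  intro k
  induction k using Nat.strong_induction_on with
  | _ k ih =>
    intro frag n l hk hn hl hln
    rw [scanL]
    by_cases h : l < n
    · rcases hget : PySem.List.pyGet? frag l with _ | v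
      · exfalso
        rw [pyGet?_inrange frag l hl (by omega)] at hget
        exact absurd hget (by simp)
      · cases v with
        | none =>
          simp only [dif_pos h]
          refine ⟨le_refl l, by omega, fun i hi1 hi2 => absurd hi1 (by omega), fun _ => hget⟩
        | some v =>
          simp only [dif_pos h]
          obtain ⟨h1, h2, h3, h4⟩ := ih (n - (l + 1)).toNat (by omega) frag n (l + 1) rfl hn (by omega) (by omega)
          refine ⟨by omega, h2, ?_, h4⟩
          intro i hi1 hi2
          rcases eq_or_lt_of_le hi1 with rfl | hlt
          · intro hna; simp [NoneAt, hget] at hna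
          · exact h3 i (by omega) hi2
    · simp only [dif_neg h]
      exact ⟨le_refl l, by omega, fun i hi1 hi2 => absurd hi1 (by omega), fun hc => absurd hc (by omega)⟩

lemma scanR_spec : ∀ (k : Nat) (frag : List (Option Int)) (r : Int), (r + 1).toNat = k →
    r ≤ (frag.length : Int) - 1 →
    scanR frag r ≤ r ∧
    (∀ i, scanR frag r < i → i ≤ r → ¬ SomeAt frag i) ∧
    (0 ≤ scanR frag r → SomeAt frag (scanR frag r)) := by
  intro k
  induction k using Nat.strong_induction_on with
  | _ k ih =>
    intro frag r hk hr
    rw [scanR]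
    by_cases h : 0 ≤ r
    · rcases hget : PySem.List.pyGet? frag r with _ | v
      · exfalso
        rw [pyGet?_inrange frag r h (by omega)] at hget
        exact absurd hget (by simp)
      · cases v with
        | none =>
          simp only [dif_pos h]
          obtain ⟨h1, h2, h3⟩ := ih (r - 1 + 1).toNat (by omega) frag (r - 1) rfl (by omega)
          refine ⟨by omega, ?_, h3⟩
          intro i hi1 hi2
          rcases eq_or_lt_of_le hi2 with rfl | hlt
          · intro hsa
            exact not_noneAt_someAt frag i hget hsa
          · exact h2 i hi1 (by omega)
        | some v =>
          simp only [dif_pos h]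
          refine ⟨le_refl r, fun i hi1 hi2 => absurd hi1 (by omega), fun _ => ⟨v, hget⟩⟩
    · simp only [dif_neg h]
      exact ⟨le_refl r, fun i hi1 hi2 => absurd hi1 (by omega), fun hc => absurd hc (by omega)⟩

-- one-step preservation of the simulation invariant across a swap
lemma inv_step (frag : List (Option Int)) (l r fl rl : Int) (fs rs : List Int)
    (X Y : Int → Prop) (hInv : SimInv frag l r (fl :: fs) (rl :: rs) X Y) (hlt : fl < rl) :
    SimInv (pySwap frag fl rl) fl rl fs rs (fun i => X i ∨ i = rl) (fun i => Y i ∨ i = fl) := by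
  obtain ⟨hl0, hln, hr1, hfsp, hrsp, hc, hd, he, hf, hg⟩ := hInv
  have hfl := (hc fl).mpr (Or.inl (List.mem_cons_self))
  have hrl := (hd rl).mpr (Or.inl (List.mem_cons_self))
  have hfl0 : 0 ≤ fl := le_trans hl0 hfl.1
  have hfl1 : fl < (frag.length : Int) := hfl.2.1
  have hrl0 : 0 ≤ rl := hrl.1
  have hrl1 : rl < (frag.length : Int) := by omega
  have hfsh : ∀ j ∈ fs, fl < j := (List.pairwise_cons.mp hfsp).1
  have hrsh : ∀ j ∈ rs, j < rl := (List.pairwise_cons.mp hrsp).1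
  have hG : ∀ m : Int, 0 ≤ m → PySem.List.pyGet? (pySwap frag fl rl) m =
      if m = rl then PySem.List.pyGet? frag fl
      else if m = fl then PySem.List.pyGet? frag rl
      else PySem.List.pyGet? frag m := fun m hm =>
    pyGet?_pySwap frag fl rl m hfl0 hfl1 hrl0 hrl1 hm
  have hlen : ((pySwap frag fl rl).length : Int) = (frag.length : Int) := by
    rw [length_pySwap]
  refine ⟨hfl0, by omega, by omega, (List.pairwise_cons.mp hfsp).2, (List.pairwise_cons.mp hrsp).2,
    ?_, ?_, ?_, ?_, ?_⟩
  · -- free/none characterisation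
    intro i
    by_cases hi0 : 0 ≤ i
    · rw [hlen]
      constructor
      · rintro ⟨h1, h2, h3⟩
        rw [NoneAt, hG i hi0] at h3
        by_cases hirl : i = rl
        · exact Or.inr (Or.inr hirl)
        · rw [if_neg hirl] at h3
          by_cases hifl : i = fl
          · exfalso
            rw [if_pos hifl] at h3
            exact not_noneAt_someAt frag rl h3 hrl.2.2
          · rw [if_neg hifl] at h3
            rcases (hc i).mp ⟨by omega, h2, h3⟩ with hmem | hX
            · rcases List.mem_cons.mp hmem with rfl | hmem'
              · exact absurd rfl hifl
              · exact Or.inl hmem'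
            · exact Or.inr (Or.inl hX)
      · rintro (hifs | hX | rfl)
        · obtain ⟨h1, h2, h3⟩ := (hc i).mpr (Or.inl (List.mem_cons_of_mem fl hifs))
          have hgt : fl < i := hfsh i hifs
          have hirl : i ≠ rl := fun hq => not_noneAt_someAt frag rl (hq ▸ h3) hrl.2.2
          refine ⟨by omega, h2, ?_⟩
          rw [NoneAt, hG i hi0, if_neg hirl, if_neg (by omega)]
          exact h3
        · obtain ⟨h1, h2, h3⟩ := (hc i).mpr (Or.inr hX)
          have hgt : rl < i := he i hX rl (List.mem_cons_self)
          refine ⟨by omega, h2, ?_⟩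
          rw [NoneAt, hG i hi0, if_neg (by omega), if_neg (by omega)]
          exact h3
        · refine ⟨by omega, by omega, ?_⟩
          rw [NoneAt, hG i hi0, if_pos rfl]
          exact hfl.2.2
    · constructor
      · rintro ⟨h1, _, _⟩; omega
      · rintro (hifs | hX | rfl)
        · have := ((hc i).mpr (Or.inl (List.mem_cons_of_mem fl hifs))).1; omega
        · have := ((hc i).mpr (Or.inr hX)).1; omega
        · omega
  · -- filled/some characterisation
    intro i
    by_cases hi0 : 0 ≤ i
    · constructor
      · rintro ⟨h1, h2, h3⟩
        rw [SomeAt] at h3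
        obtain ⟨v, hv⟩ := h3
        rw [hG i hi0] at hv
        by_cases hifl : i = fl
        · exact Or.inr (Or.inr hifl)
        · by_cases hirl : i = rl
          · exfalso
            rw [if_pos hirl] at hv
            exact not_noneAt_someAt frag fl hfl.2.2 ⟨v, hv⟩
          · rw [if_neg hirl, if_neg hifl] at hv
            rcases (hd i).mp ⟨h1, by omega, ⟨v, hv⟩⟩ with hmem | hY
            · rcases List.mem_cons.mp hmem with rfl | hmem'
              · exact absurd rfl hirl
              · exact Or.inl hmem'
            · exact Or.inr (Or.inl hY)
      · rintro (hirs | hY | rfl)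
        · obtain ⟨h1, h2, h3⟩ := (hd i).mpr (Or.inl (List.mem_cons_of_mem rl hirs))
          have hltr : i < rl := hrsh i hirs
          have hifl : i ≠ fl := fun hq => not_noneAt_someAt frag i (hq ▸ hfl.2.2) h3
          obtain ⟨v, hv⟩ := h3
          refine ⟨h1, by omega, ⟨v, ?_⟩⟩
          rw [hG i hi0, if_neg (by omega), if_neg hifl]
          exact hv
        · obtain ⟨h1, h2, h3⟩ := (hd i).mpr (Or.inr hY)
          have hlty : i < fl := hf i hY fl (List.mem_cons_self)
          obtain ⟨v, hv⟩ := h3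
          refine ⟨h1, by omega, ⟨v, ?_⟩⟩
          rw [hG i hi0, if_neg (by omega), if_neg (by omega)]
          exact hv
        · obtain ⟨v, hv⟩ := hrl.2.2
          refine ⟨hfl0, by omega, ⟨v, ?_⟩⟩
          rw [hG i hi0, if_neg (by omega), if_pos rfl]
          exact hv
    · constructor
      · rintro ⟨h1, _, _⟩; omega
      · rintro (hirs | hY | rfl)
        · have := ((hd i).mpr (Or.inl (List.mem_cons_of_mem rl hirs))).1; omega
        · have := ((hd i).mpr (Or.inr hY)).1; omega
        · omega
  · rintro x (hX | rfl) j hj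
    · exact he x hX j (List.mem_cons_of_mem rl hj)
    · exact hrsh j hj
  · rintro y (hY | rfl) j hj
    · exact hf y hY j (List.mem_cons_of_mem fl hj)
    · exact hfsh j hj
  · rintro y x (hY | rfl) (hX | rfl)
    · exact hg y x hY hX
    · have := hf y hY fl (List.mem_cons_self); omega
    · have := he x hX rl (List.mem_cons_self); omega
    · omega

lemma loopAB : ∀ (k : Nat) (fb : Int), fb.toNat = k →
    ∀ (frag : List (Option Int)) (l r : Int) (free filled : List Int) (X Y : Int → Prop),
    SimInv frag l r free filled X Y →
    loopA frag (frag.length : Int) fb l r = loopB frag free filled fb := by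
  intro k
  induction k using Nat.strong_induction_on with
  | _ k ih =>
    intro fb hk frag l r free filled X Y hInv
    obtain ⟨hl0, hln, hr1, hfsp, hrsp, hc, hd, he, hf, hg⟩ := hInv
    rw [loopA]
    by_cases hfb : fb > 0
    · simp only [dif_pos hfb]
      obtain ⟨hL1, hL2, hL3, hL4⟩ :=
        scanL_spec ((frag.length : Int) - l).toNat frag (frag.length : Int) l rfl rfl hl0 hln
      obtain ⟨hR1, hR2, hR3⟩ := scanR_spec (r + 1).toNat frag r rfl hr1
      set l' := scanL frag (frag.length : Int) l with hl'def
      set r' := scanR frag r with hr'def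
      have hSl : ∀ i, (i ∈ free ∨ X i) → l' ≤ i := by
        intro i hi
        obtain ⟨h1, h2, h3⟩ := (hc i).mpr hi
        by_contra hcon
        exact hL3 i h1 (by omega) h3
      have hmemL : l' < (frag.length : Int) → (l' ∈ free ∨ X l') := fun h =>
        (hc l').mp ⟨hL1, h, hL4 h⟩
      have hSr : ∀ i, (i ∈ filled ∨ Y i) → i ≤ r' := by
        intro i hi
        obtain ⟨h1, h2, h3⟩ := (hd i).mpr hi
        by_contra hcon
        exact hR2 i (by omega) h2 h3
      have hmemR : 0 ≤ r' → (r' ∈ filled ∨ Y r') := fun h =>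
        (hd r').mp ⟨h, hR1, hR3 h⟩
      cases free with
      | nil =>
        have hbrk : l' ≥ r' := by
          by_cases hr0 : 0 ≤ r'
          · by_cases hln' : l' < (frag.length : Int)
            · rcases hmemL hln' with hmem | hX
              · exact absurd hmem (List.not_mem_nil)
              · rcases hmemR hr0 with hmem' | hY
                · exact le_of_lt (he l' hX r' hmem')
                · exact le_of_lt (hg r' l' hY hX)
            · omega
          · omega
        rw [if_pos hbrk]
        cases filled <;> rw [loopB] <;> (intro a b c d h1 h2; exact absurd h1 (by simp))
      | cons fl fs =>
        have hcfl := (hc fl).mpr (Or.inl (List.mem_cons_self))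
        have hl'fl : l' ≤ fl := hSl fl (Or.inl (List.mem_cons_self))
        have hl'n : l' < (frag.length : Int) := by omega
        have hLeq : l' ∈ fl :: fs → l' = fl := by
          intro hmem
          rcases List.mem_cons.mp hmem with h | h
          · exact h
          · have := (List.pairwise_cons.mp hfsp).1 l' h; omega
        cases filled with
        | nil =>
          have hbrk : l' ≥ r' := by
            by_cases hr0 : 0 ≤ r'
            · rcases hmemR hr0 with hmem | hY
              · exact absurd hmem (List.not_mem_nil)
              · rcases hmemL hl'n with hmem' | hX
                · have := hf r' hY l' hmem'; omega
                · exact le_of_lt (hg r' l' hY hX)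
            · omega
          (rw [if_pos hbrk, loopB]; intro a b c d h1 h2; exact absurd h2 (by simp))
        | cons rl rs =>
          have hcrl := (hd rl).mpr (Or.inl (List.mem_cons_self))
          have hrlr' : rl ≤ r' := hSr rl (Or.inl (List.mem_cons_self))
          have hr'0 : 0 ≤ r' := le_trans hcrl.1 hrlr'
          have hReq : r' ∈ rl :: rs → r' = rl := by
            intro hmem
            rcases List.mem_cons.mp hmem with h | h
            · exact h
            · have := (List.pairwise_cons.mp hrsp).1 r' h; omega
          by_cases hswap : fl < rl
          · have hl'eq : l' = fl := by
              rcases hmemL hl'n with hmem | hX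
              · exact hLeq hmem
              · have := he l' hX rl (List.mem_cons_self); omega
            have hr'eq : r' = rl := by
              rcases hmemR hr'0 with hmem | hY
              · exact hReq hmem
              · have := hf r' hY fl (List.mem_cons_self); omega
            rw [if_neg (by omega), loopB, if_neg (by omega), hl'eq, hr'eq]
            have hInv' := inv_step frag l r fl rl fs rs X Y
              ⟨hl0, hln, hr1, hfsp, hrsp, hc, hd, he, hf, hg⟩ hswap
            have hlen : ((pySwap frag fl rl).length : Int) = (frag.length : Int) := by
              rw [length_pySwap]
            calc loopA (pySwap frag fl rl) (frag.length : Int) (fb - 1) fl rl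
                = loopA (pySwap frag fl rl) ((pySwap frag fl rl).length : Int) (fb - 1) fl rl := by
                  rw [hlen]
              _ = loopB (pySwap frag fl rl) fs rs (fb - 1) :=
                  ih (fb - 1).toNat (by omega) (fb - 1) rfl (pySwap frag fl rl) fl rl fs rs _ _ hInv'
          · have hbrk : l' ≥ r' := by
              rcases hmemL hl'n with hmem | hX
              · have hl'eq := hLeq hmem
                rcases hmemR hr'0 with hmem' | hY
                · have := hReq hmem'; omega
                · have := hf r' hY fl (List.mem_cons_self); omega
              · rcases hmemR hr'0 with hmem' | hY
                · rcases List.mem_cons.mp hmem' with rfl | h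
                  · exact le_of_lt (he l' hX r' (List.mem_cons_self))
                  · exact le_of_lt (he l' hX r' (List.mem_cons_of_mem rl h))
                · exact le_of_lt (hg r' l' hY hX)
            rw [if_pos hbrk, loopB, if_pos (Or.inr (by omega))]
    · simp only [dif_neg hfb]
      cases free with
      | nil => cases filled <;> rw [loopB] <;> (intro a b c d h1 h2; exact absurd h1 (by simp))
      | cons fl fs =>
        cases filled with
        | nil => (rw [loopB]; intro a b c d h1 h2; exact absurd h2 (by simp))
        | cons rl rs => rw [loopB, if_pos (Or.inl (by omega))]

lemma mem_noneIdx (frag : List (Option Int)) (i : Int) :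
    i ∈ noneIdx frag ↔ 0 ≤ i ∧ i < (frag.length : Int) ∧ NoneAt frag i := by
  rw [noneIdx, List.mem_filterMap]
  constructor
  · rintro ⟨p, hmem, hfx⟩
    obtain ⟨kk, hkk, rfl⟩ := (PySem.List.mem_enumerate_iff frag 0 p).mp hmem
    rcases hfr : frag[kk] with _ | v
    · simp [hfr] at hfx
      have hik : i = (kk : Int) := by omega
      subst hik
      refine ⟨by omega, by omega, ?_⟩
      show PySem.List.pyGet? frag (kk : Int) = some none
      rw [pyGet?_inrange frag (kk : Int) (by omega) (by omega)]
      simp only [Int.toNat_natCast]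
      exact congrArg some hfr
    · simp [hfr] at hfx
  · rintro ⟨h0, h1, h2⟩
    have hfr : frag[i.toNat]'(by omega) = none := by
      unfold NoneAt at h2
      rw [pyGet?_inrange frag i h0 h1] at h2
      exact Option.some_injective _ h2
    refine ⟨(i, none), (PySem.List.mem_enumerate_iff frag 0 (i, none)).mpr
      ⟨i.toNat, by omega, ?_⟩, rfl⟩
    rw [Prod.mk.injEq]
    exact ⟨by omega, hfr.symm⟩

lemma mem_someIdx (frag : List (Option Int)) (i : Int) :
    i ∈ someIdx frag ↔ 0 ≤ i ∧ i < (frag.length : Int) ∧ SomeAt frag i := by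
  rw [someIdx, List.mem_filterMap]
  constructor
  · rintro ⟨p, hmem, hfx⟩
    obtain ⟨kk, hkk, rfl⟩ := (PySem.List.mem_enumerate_iff frag 0 p).mp hmem
    rcases hfr : frag[kk] with _ | v
    · simp [hfr] at hfx
    · simp [hfr] at hfx
      have hik : i = (kk : Int) := by omega
      subst hik
      refine ⟨by omega, by omega, ⟨v, ?_⟩⟩
      rw [pyGet?_inrange frag (kk : Int) (by omega) (by omega)]
      simp only [Int.toNat_natCast]
      exact congrArg some hfr
  · rintro ⟨h0, h1, ⟨v, hv⟩⟩
    have hfr : frag[i.toNat]'(by omega) = some v := by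
      rw [pyGet?_inrange frag i h0 h1] at hv
      exact Option.some_injective _ hv
    refine ⟨(i, some v), (PySem.List.mem_enumerate_iff frag 0 (i, some v)).mpr
      ⟨i.toNat, by omega, ?_⟩, rfl⟩
    rw [Prod.mk.injEq]
    exact ⟨by omega, hfr.symm⟩

lemma sorted_noneIdx (frag : List (Option Int)) : List.Pairwise (· < ·) (noneIdx frag) := by
  rw [noneIdx, List.pairwise_filterMap]
  refine List.Pairwise.imp ?_ (PySem.List.pairwise_lt_enumerate frag 0)
  intro p q hpq b hb b' hb'
  cases hp : p.2 <;> rw [hp] at hb <;> simp at hb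
  cases hq : q.2 <;> rw [hq] at hb' <;> simp at hb'
  omega

lemma sorted_someIdx (frag : List (Option Int)) : List.Pairwise (· < ·) (someIdx frag) := by
  rw [someIdx, List.pairwise_filterMap]
  refine List.Pairwise.imp ?_ (PySem.List.pairwise_lt_enumerate frag 0)
  intro p q hpq b hb b' hb'
  cases hp : p.2 <;> rw [hp] at hb <;> simp at hb
  cases hq : q.2 <;> rw [hq] at hb' <;> simp at hb'
  omega

lemma inv_init (frag : List (Option Int)) :
    SimInv frag 0 ((frag.length : Int) - 1) (noneIdx frag) ((someIdx frag).reverse)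
      (fun _ => False) (fun _ => False) := by
  refine ⟨le_refl 0, by omega, by omega, sorted_noneIdx frag, ?_, ?_, ?_, ?_, ?_, ?_⟩
  · rw [List.pairwise_reverse]
    exact sorted_someIdx frag
  · intro i
    rw [mem_noneIdx]
    constructor
    · rintro ⟨h1, h2, h3⟩; exact Or.inl ⟨h1, h2, h3⟩
    · rintro (⟨h1, h2, h3⟩ | hF)
      · exact ⟨h1, h2, h3⟩
      · exact absurd hF (by simp)
  · intro i
    rw [List.mem_reverse, mem_someIdx]
    constructor
    · rintro ⟨h1, h2, h3⟩; exact Or.inl ⟨h1, by omega, h3⟩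
    · rintro (⟨h1, h2, h3⟩ | hF)
      · exact ⟨h1, by omega, h3⟩
      · exact absurd hF (by simp)
  · rintro x hF; exact absurd hF (by simp)
  · rintro y hF; exact absurd hF (by simp)
  · rintro y x hF; exact absurd hF (by simp)

-- ===== VERDICT (by name: the statement is the Claim_ definition above) =====
theorem defragmant_spec : Claim_equal_defragmant := by
  intro frag fb _
  unfold Spec_defragmant defragmant defragmant_alt
  exact loopAB fb.toNat fb rfl frag 0 ((frag.length : Int) - 1) (noneIdx frag)
    ((someIdx frag).reverse) (fun _ => False) (fun _ => False) (inv_init frag)
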